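-- pv_equiv track=rewrite | github.com/dspropertiesnc/ds-flyer-creation-tool | layout.py | build_headline
-- ===== SOURCE A (Python) =====
-- def build_headline(building_type: str | None) -> str:
--     """'HOME FOR RENT' for single-family, 'UNIT FOR RENT' for multi-unit types."""
--     if not building_type:
--         return "HOME FOR RENT"
--     bt = building_type.lower()
--     unit_keywords = ["duplex", "triplex", "quad", "apartment", "condo", "townhouse", "unit", "multi"]
--     if any(k in bt for k in unit_keywords):
--         return "UNIT FOR RENT"
--     return "HOME FOR RENT"
-- ===== SOURCE B (Python) =====
-- def build_headline(building_type):
--     """'HOME FOR RENT' for single-family, 'UNIT FOR RENT' for multi-unit types."""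
--     if not building_type:
--         return "HOME FOR RENT"
--     keywords = ["duplex", "triplex", "quad", "apartment", "condo", "townhouse", "unit", "multi"]
--     s = building_type.lower()
--     while s:
--         if any(s.startswith(k) for k in keywords):
--             return "UNIT FOR RENT"
--         s = s[1:]
--     return "HOME FOR RENT"
-- ===== Notes on version B (the rewrite author's own statement) =====
-- stated objective: alternative
-- what changed: Replaces the per-keyword substring scans (any(k in bt)) with a single left-to-right sweep over the string's suffixes that prefix-checks each keyword at the current position and returns on the first hit.
import Mathlib
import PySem

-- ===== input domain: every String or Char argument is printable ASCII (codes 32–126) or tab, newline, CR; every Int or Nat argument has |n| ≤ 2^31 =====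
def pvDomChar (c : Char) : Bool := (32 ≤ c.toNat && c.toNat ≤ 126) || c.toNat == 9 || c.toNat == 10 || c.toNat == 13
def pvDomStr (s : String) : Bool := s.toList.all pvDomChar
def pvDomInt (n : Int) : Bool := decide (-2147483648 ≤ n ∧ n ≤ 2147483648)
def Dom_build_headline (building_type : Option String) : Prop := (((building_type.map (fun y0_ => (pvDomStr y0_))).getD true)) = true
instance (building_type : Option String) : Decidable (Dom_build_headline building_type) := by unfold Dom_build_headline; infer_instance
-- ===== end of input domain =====

-- B replaces A's per-keyword substring scans with a single sweep over the string's
-- suffixes, prefix-checking each keyword at the current position (alternative decomposition).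


-- ===== PORT A =====
def pvUnitKeywordsA : List String :=
  ["duplex", "triplex", "quad", "apartment", "condo", "townhouse", "unit", "multi"]

def build_headline (building_type : Option String) : String :=
  match building_type with
  | none => "HOME FOR RENT"
  | some s =>
    if s = "" then "HOME FOR RENT"
    else
      let bt := PySem.Str.lower s
      if pvUnitKeywordsA.any (fun k => PySem.Str.isIn k bt) then "UNIT FOR RENT"
      else "HOME FOR RENT"

-- ===== PORT B =====
def pvKeywordsB : List String :=
  ["duplex", "triplex", "quad", "apartment", "condo", "townhouse", "unit", "multi"]

-- the while loop of Source B: s nonempty → test keywords as prefixes, then s = s[1:]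
def pvSweep (kws : List String) : List Char → Bool
  | [] => false
  | c :: rest =>
    if kws.any (fun k => PySem.Chars.startswith (c :: rest) k.toList) then true
    else pvSweep kws rest

def build_headline_alt (building_type : Option String) : String :=
  match building_type with
  | none => "HOME FOR RENT"
  | some s =>
    if s = "" then "HOME FOR RENT"
    else
      if pvSweep pvKeywordsB (PySem.Str.lower s).toList then "UNIT FOR RENT"
      else "HOME FOR RENT"

-- ===== PRECONDITION & SPEC =====
def Spec_build_headline (building_type : Option String) (out : String) : Prop := out = build_headline_alt building_type
instance (building_type : Option String) (out : String) : Decidable (Spec_build_headline building_type out) := by unfold Spec_build_headline; infer_instance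

-- ===== CLAIM (what is proved, stated in full; the proofs are below) =====
def Claim_equal_build_headline : Prop := ∀ (building_type : Option String), Dom_build_headline building_type → Spec_build_headline building_type (build_headline building_type)

-- ===== LEMMAS AND PROOFS =====

-- the suffix sweep finds exactly the keywords occurring as infixes (keywords nonempty)
theorem pvSweep_iff (kws : List String) (h : ∀ k ∈ kws, k.toList ≠ []) (l : List Char) :
    pvSweep kws l = true ↔ ∃ k ∈ kws, k.toList <:+: l := by
  induction l with
  | nil =>
    simp only [pvSweep, List.infix_nil]
    constructor
    · intro hf; cases hf
    · rintro ⟨k, hk, he⟩; exact absurd he (h k hk)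
  | cons c rest ih =>
    rw [pvSweep]
    by_cases hp : kws.any (fun k => PySem.Chars.startswith (c :: rest) k.toList) = true
    · rw [if_pos hp]
      refine ⟨fun _ => ?_, fun _ => rfl⟩
      rcases List.any_eq_true.mp hp with ⟨k, hk, hks⟩
      exact ⟨k, hk, List.infix_cons_iff.mpr (Or.inl
        (List.isPrefixOf_iff_prefix.mp (by simpa [PySem.Chars.startswith] using hks)))⟩
    · rw [if_neg hp, ih]
      constructor
      · rintro ⟨k, hk, hi⟩; exact ⟨k, hk, (List.infix_cons_iff).mpr (Or.inr hi)⟩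
      · rintro ⟨k, hk, hi⟩
        rcases List.infix_cons_iff.mp hi with hpre | hinf
        · exact absurd (List.any_eq_true.mpr ⟨k, hk,
            by simpa [PySem.Chars.startswith] using List.isPrefixOf_iff_prefix.mpr hpre⟩) hp
        · exact ⟨k, hk, hinf⟩

theorem pvAny_eq_sweep (t : String) :
    pvUnitKeywordsA.any (fun k => PySem.Str.isIn k t) = pvSweep pvKeywordsB t.toList := by
  rw [Bool.eq_iff_iff, pvSweep_iff pvKeywordsB (by decide) t.toList, List.any_eq_true]
  constructor
  · rintro ⟨k, hk, hi⟩; exact ⟨k, hk, (PySem.Str.isIn_iff_infix k t).mp hi⟩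
  · rintro ⟨k, hk, hi⟩; exact ⟨k, hk, (PySem.Str.isIn_iff_infix k t).mpr hi⟩

-- ===== VERDICT (by name: the statement is the Claim_ definition above) =====
theorem build_headline_spec : Claim_equal_build_headline := by
  intro building_type _
  unfold Spec_build_headline build_headline build_headline_alt
  cases building_type with
  | none => rfl
  | some s =>
    by_cases hs : s = ""
    · simp [hs]
    · simp only [if_neg hs, pvAny_eq_sweep (PySem.Str.lower s)]
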